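-- pv_equiv track=rewrite | github.com/GcvKishore/Protein-Sequencing | hw6_protein.py | makeAminoAcidLabels
-- ===== SOURCE A (Python) =====
-- def combineProteins(proteinList):
--     list1=[]
--     for i in proteinList:
--         for j in i:
--             if i not in list1:
--                 list1.append(j)
--     return list1
--
-- def aminoAcidDictionary(aaList):
--     dict1={}
--     for i in aaList:
--         if i in dict1:
--             dict1[i] = dict1[i] + 1
--         else:
--             dict1[i] = 1
--     return dict1
--
-- def makeAminoAcidLabels(proteinList1, proteinList2):
--     gene=[]
--     list1=combineProteins(proteinList1)
--     list2=combineProteins(proteinList2)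
--     dict_1=aminoAcidDictionary(list1)
--     dict_2=aminoAcidDictionary(list2)
--     for i in dict_1:
--         if i not in gene:
--             gene.append(i)
--     for j in dict_2:
--         if j not in gene:
--             gene.append(j)
--     gene.sort()
--     return gene
-- ===== SOURCE B (Python) =====
-- def makeAminoAcidLabels(proteinList1, proteinList2):
--     s1 = {aa for p in proteinList1 for aa in p}
--     s2 = {aa for p in proteinList2 for aa in p}
--     return sorted(s1 | s2)
-- ===== Notes on version B (the rewrite author's own statement) =====
-- stated objective: simpler
-- what changed: Replaces A's four phases (per-protein flatten with a quadratic list-membership dedup, two counting dictionaries, two dedup-append loops, then sort) by one set-comprehension per list, a set union and a single sorted() call.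
import Mathlib
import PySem

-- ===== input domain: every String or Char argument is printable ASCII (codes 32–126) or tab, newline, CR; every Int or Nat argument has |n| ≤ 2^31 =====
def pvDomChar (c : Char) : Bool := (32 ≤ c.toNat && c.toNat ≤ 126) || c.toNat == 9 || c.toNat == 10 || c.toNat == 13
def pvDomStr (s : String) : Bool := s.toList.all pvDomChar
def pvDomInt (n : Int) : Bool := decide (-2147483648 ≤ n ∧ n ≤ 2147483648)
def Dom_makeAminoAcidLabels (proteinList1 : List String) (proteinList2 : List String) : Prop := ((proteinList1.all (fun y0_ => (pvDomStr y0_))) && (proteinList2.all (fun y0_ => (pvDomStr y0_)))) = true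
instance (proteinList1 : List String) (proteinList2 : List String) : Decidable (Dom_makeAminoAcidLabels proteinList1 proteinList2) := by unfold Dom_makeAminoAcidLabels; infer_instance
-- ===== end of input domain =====

-- B replaces A's four phases (flatten with list-membership dedup, two count dictionaries,
-- two dedup-append loops, sort) by two set comprehensions, a union and one sorted() call: simpler.


-- ===== PORT A =====
-- combineProteins: note Python's inner test is 'if i not in list1' (the PROTEIN, not the char) — ported as is
def pvCombineProteins (proteinList : List String) : List String :=
  proteinList.foldl (fun list1 i =>
    i.toList.foldl (fun acc j =>
      if acc.contains i then acc else acc ++ [String.ofList [j]]) list1) []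

def pvAminoAcidDictionary (aaList : List String) : PySem.Dict String Int :=
  aaList.foldl (fun d i =>
    if d.contains i then d.insert i (d.getD i 0 + 1) else d.insert i 1) PySem.Dict.empty

def makeAminoAcidLabels (proteinList1 : List String) (proteinList2 : List String) : List String :=
  let list1 := pvCombineProteins proteinList1
  let list2 := pvCombineProteins proteinList2
  let dict1 := pvAminoAcidDictionary list1
  let dict2 := pvAminoAcidDictionary list2
  let gene1 := dict1.keys.foldl (fun gene i => if gene.contains i then gene else gene ++ [i]) ([] : List String)
  let gene2 := dict2.keys.foldl (fun gene j => if gene.contains j then gene else gene ++ [j]) gene1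
  PySem.List.sorted gene2 (fun x => x) false

-- ===== PORT B =====
def makeAminoAcidLabels_alt (proteinList1 : List String) (proteinList2 : List String) : List String :=
  let s1 : PySem.Set String := PySem.Set.ofList (proteinList1.flatMap (fun p => p.toList.map (fun aa => String.ofList [aa])))
  let s2 : PySem.Set String := PySem.Set.ofList (proteinList2.flatMap (fun p => p.toList.map (fun aa => String.ofList [aa])))
  PySem.List.sorted (PySem.Set.union s1 s2) (fun x => x) false

-- ===== PRECONDITION & SPEC =====
def Spec_makeAminoAcidLabels (proteinList1 : List String) (proteinList2 : List String) (out : List String) : Prop := out = makeAminoAcidLabels_alt proteinList1 proteinList2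
instance (proteinList1 : List String) (proteinList2 : List String) (out : List String) : Decidable (Spec_makeAminoAcidLabels proteinList1 proteinList2 out) := by unfold Spec_makeAminoAcidLabels; infer_instance

-- ===== CLAIM (what is proved, stated in full; the proofs are below) =====
def Claim_equal_makeAminoAcidLabels : Prop := ∀ (proteinList1 : List String) (proteinList2 : List String), Dom_makeAminoAcidLabels proteinList1 proteinList2 → Spec_makeAminoAcidLabels proteinList1 proteinList2 (makeAminoAcidLabels proteinList1 proteinList2)

-- ===== LEMMAS AND PROOFS =====

-- the flattened 1-char-string list B builds from one protein list
def pvFlat (pl : List String) : List String :=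
  pl.flatMap (fun p => p.toList.map (fun aa => String.ofList [aa]))

-- inner loop of combineProteins when the protein can never enter the accumulator: no char is skipped
lemma pvInner_no_skip (i : String) (hne : ∀ c : Char, String.ofList [c] ≠ i) :
    ∀ (cs : List Char) (acc : List String), i ∉ acc →
      cs.foldl (fun acc j => if acc.contains i then acc else acc ++ [String.ofList [j]]) acc
        = acc ++ cs.map (fun c => String.ofList [c]) := by
  intro cs
  induction cs with
  | nil => intro acc _; simp
  | cons c cs ih =>
    intro acc hacc
    have hc : acc.contains i = false := by
      simp only [← Bool.not_eq_true, List.contains_iff_mem]; exact hacc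
    simp only [List.foldl_cons, hc, Bool.false_eq_true, if_false]
    rw [ih (acc ++ [String.ofList [c]]) (by
      simp only [List.mem_append, List.mem_singleton]
      rintro (h | h)
      · exact hacc h
      · exact hne c h.symm)]
    simp

-- the outer loop of combineProteins: membership is exactly that of pvFlat, and every element is a 1-char string
lemma pvCombine_aux :
    ∀ (pl : List String) (acc : List String), (∀ s ∈ acc, ∃ c, s = String.ofList [c]) →
      (∀ s ∈ pl.foldl (fun list1 i =>
          i.toList.foldl (fun acc j => if acc.contains i then acc else acc ++ [String.ofList [j]]) list1) acc,
        ∃ c, s = String.ofList [c]) ∧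
      (∀ x, x ∈ pl.foldl (fun list1 i =>
          i.toList.foldl (fun acc j => if acc.contains i then acc else acc ++ [String.ofList [j]]) list1) acc
        ↔ x ∈ acc ∨ x ∈ pvFlat pl) := by
  intro pl
  induction pl with
  | nil => intro acc hacc; exact ⟨hacc, by simp [pvFlat]⟩
  | cons i pl ih =>
    intro acc hacc
    simp only [List.foldl_cons]
    -- analyse one protein i
    have step : ∀ x, (x ∈ i.toList.foldl (fun acc j => if acc.contains i then acc else acc ++ [String.ofList [j]]) acc
          ↔ x ∈ acc ∨ x ∈ i.toList.map (fun c => String.ofList [c])) ∧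
        (∀ s ∈ i.toList.foldl (fun acc j => if acc.contains i then acc else acc ++ [String.ofList [j]]) acc,
          ∃ c, s = String.ofList [c]) := by
      intro x
      rcases h : i.toList with _ | ⟨c, cs⟩
      · exact ⟨by simp, hacc⟩
      rcases cs with _ | ⟨c2, cs⟩
      · -- single-character protein: i = "c"
        have hi : String.ofList [c] = i := by rw [← h]; exact String.ofList_toList
        by_cases hm : i ∈ acc
        · have hc : acc.contains i = true := List.contains_iff_mem.mpr hm
          refine ⟨?_, ?_⟩
          · simp only [List.foldl_cons, List.foldl_nil, hc, if_true, List.map, hi]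
            constructor
            · exact fun hx => Or.inl hx
            · rintro (hx | hx)
              · exact hx
              · simp at hx; rw [hx]; exact hm
          · simp only [List.foldl_cons, List.foldl_nil, hc, if_true]; exact hacc
        · have hc : acc.contains i = false := by
            simp only [← Bool.not_eq_true, List.contains_iff_mem]; exact hm
          refine ⟨?_, ?_⟩
          · simp [List.foldl_cons, hm]
          · intro s hs
            simp only [List.foldl_cons, List.foldl_nil, hc, Bool.false_eq_true, if_false,
              List.mem_append, List.mem_singleton] at hs
            rcases hs with hs | hs
            · exact hacc s hs
            · exact ⟨c, hs⟩
      · -- protein of length ≥ 2: never equal to a 1-char string, never skipped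
        have hne : ∀ c' : Char, String.ofList [c'] ≠ i := by
          intro c' hEq
          have := congrArg String.toList hEq
          rw [String.toList_ofList, h] at this
          simp at this
        have hm : i ∉ acc := by
          intro hmem
          rcases hacc i hmem with ⟨c', hc'⟩
          exact hne c' hc'.symm
        rw [pvInner_no_skip i hne (c :: c2 :: cs) acc hm]
        refine ⟨by simp, ?_⟩
        intro s hs
        simp only [List.mem_append, List.mem_map] at hs
        rcases hs with hs | ⟨c', _, hc'⟩
        · exact hacc s hs
        · exact ⟨c', hc'.symm⟩
    rcases ih (i.toList.foldl (fun acc j => if acc.contains i then acc else acc ++ [String.ofList [j]]) acc)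
        (fun s hs => (step s).2 s hs) with ⟨hsing, hmem⟩
    refine ⟨hsing, fun x => ?_⟩
    rw [hmem x, (step x).1]
    simp [pvFlat, or_assoc]

lemma pvMem_combine (pl : List String) (x : String) :
    x ∈ pvCombineProteins pl ↔ x ∈ pvFlat pl := by
  have := (pvCombine_aux pl [] (by simp)).2 x
  unfold pvCombineProteins
  simpa using this

-- keys of aminoAcidDictionary l = set(l) in first-occurrence order
lemma pvKeys_aadict (l : List String) :
    (pvAminoAcidDictionary l).keys = PySem.Set.ofList l := by
  have hfun : (fun (d : PySem.Dict String Int) (i : String) =>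
        if d.contains i then d.insert i (d.getD i 0 + 1) else d.insert i 1)
      = fun d i => d.insert i (if d.contains i then d.getD i 0 + 1 else 1) := by
    funext d i; by_cases h : d.contains i <;> simp [h]
  unfold pvAminoAcidDictionary
  rw [hfun, PySem.Dict.keys_foldl_insert]
  simp [PySem.Dict.empty, PySem.Dict.keys, PySem.Set.update_nil_left]

-- the gene-building dedup loop is set.add folded, i.e. Set.update
lemma pvGene_eq_update (ks : List String) (g : List String) :
    ks.foldl (fun gene i => if gene.contains i then gene else gene ++ [i]) g
      = PySem.Set.update g ks := by
  have : (fun (gene : List String) (i : String) => if gene.contains i then gene else gene ++ [i])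
      = fun gene i => PySem.Set.add gene i := by
    funext gene i; simp [PySem.Set.add, PySem.Set.contains]
  rw [this]; rfl

-- ===== VERDICT (by name: the statement is the Claim_ definition above) =====
theorem makeAminoAcidLabels_spec : Claim_equal_makeAminoAcidLabels := by
  intro l1 l2 _
  unfold Spec_makeAminoAcidLabels makeAminoAcidLabels makeAminoAcidLabels_alt
  simp only [pvGene_eq_update, pvKeys_aadict]
  apply PySem.List.sorted_eq_sorted_of_perm
  · exact fun a b h => h
  · apply (List.perm_ext_iff_of_nodup ?_ ?_).mpr
    · intro a
      simp only [PySem.Set.mem_update, PySem.Set.mem_union, PySem.Set.mem_ofList,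
        pvMem_combine]
      unfold pvFlat
      tauto
    · exact PySem.Set.nodup_update _ _ (PySem.Set.nodup_update _ _ (by simp))
    · exact PySem.Set.nodup_union _ _ (PySem.Set.nodup_ofList _)
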